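-- pv_equiv track=rewrite | github.com/om-apex/tool-mcp-server | src/om_apex_mcp/tools/documents.py | _strip_cover_from_markdown
-- ===== SOURCE A (Python) =====
-- def _strip_cover_from_markdown(md_content: str) -> str:
--     """Remove the title and metadata block from markdown since cover page handles it."""
--     lines = md_content.strip().split("\n")
--     skip_until_separator = False
--     result_lines = []
--     found_first_heading = False
--
--     for line in lines:
--         stripped = line.strip()
--         if not found_first_heading and stripped.startswith("# "):
--             found_first_heading = True
--             skip_until_separator = True
--             continue
--         if skip_until_separator:
--             if stripped == "---":
--                 skip_until_separator = False
--                 continue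
--             continue
--         result_lines.append(line)
--
--     return "\n".join(result_lines)
-- ===== SOURCE B (Python) =====
-- def _strip_cover_from_markdown(md_content: str) -> str:
--     """Remove the title and metadata block from markdown since cover page handles it."""
--     lines = md_content.strip().split("\n")
--     head_idx = next((i for i, l in enumerate(lines) if l.strip().startswith("# ")), None)
--     if head_idx is None:
--         return "\n".join(lines)
--     before = lines[:head_idx]
--     after = lines[head_idx + 1:]
--     sep_idx = next((i for i, l in enumerate(after) if l.strip() == "---"), None)
--     if sep_idx is None:
--         return "\n".join(before)
--     return "\n".join(before + after[sep_idx + 1:])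
-- ===== Notes on version B (the rewrite author's own statement) =====
-- stated objective: simpler
-- what changed: Replaced the stateful single loop with two boolean flags by two targeted index searches (first heading line, first '---' after it) followed by list slicing.
import Mathlib
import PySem

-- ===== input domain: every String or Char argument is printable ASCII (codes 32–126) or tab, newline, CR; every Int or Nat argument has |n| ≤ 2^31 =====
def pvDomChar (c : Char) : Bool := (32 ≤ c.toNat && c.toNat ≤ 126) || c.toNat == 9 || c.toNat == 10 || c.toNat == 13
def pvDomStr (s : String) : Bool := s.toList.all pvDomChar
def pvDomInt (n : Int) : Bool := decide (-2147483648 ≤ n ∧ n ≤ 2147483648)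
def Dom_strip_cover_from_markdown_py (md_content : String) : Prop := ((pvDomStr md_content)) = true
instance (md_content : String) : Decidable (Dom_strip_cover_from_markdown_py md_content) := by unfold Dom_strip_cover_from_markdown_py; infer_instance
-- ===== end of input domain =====

-- B replaces A's stateful flag loop by two index searches plus slicing (objective: simpler).

-- ===== PORT A =====
-- state: (result_lines, skip_until_separator, found_first_heading)
def pvStepA (st : List String × Bool × Bool) (line : String) : List String × Bool × Bool :=
  let stripped := PySem.Str.strip line
  if !st.2.2 && PySem.Str.startswith stripped "# " then (st.1, true, true)
  else if st.2.1 then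
    (if stripped == "---" then (st.1, false, st.2.2) else (st.1, true, st.2.2))
  else (st.1 ++ [line], st.2.1, st.2.2)

-- md_content.strip().split("\n"): the separator is the literal "\n" ≠ "", so split? is always `some`
def pvLines (md_content : String) : List String :=
  (PySem.Str.split? (PySem.Str.strip md_content) "\n").getD []

def strip_cover_from_markdown_py (md_content : String) : String :=
  let lines := pvLines md_content
  let st := lines.foldl pvStepA ([], false, false)
  PySem.Str.join "\n" st.1

-- ===== PORT B =====
-- first index whose strip() starts with "# " (B's `next` over enumerate)
def pvFindHead : List String → Option Nat
  | [] => none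
  | l :: rest =>
    if PySem.Str.startswith (PySem.Str.strip l) "# " then some 0
    else (pvFindHead rest).map (· + 1)

-- first index whose strip() equals "---"
def pvFindSep : List String → Option Nat
  | [] => none
  | l :: rest =>
    if PySem.Str.strip l == "---" then some 0
    else (pvFindSep rest).map (· + 1)

def strip_cover_from_markdown_py_alt (md_content : String) : String :=
  let lines := pvLines md_content
  match pvFindHead lines with
  | none => PySem.Str.join "\n" lines
  | some i =>
    let before := lines.take i
    let after := lines.drop (i + 1)
    match pvFindSep after with
    | none => PySem.Str.join "\n" before
    | some j => PySem.Str.join "\n" (before ++ after.drop (j + 1))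

-- ===== PRECONDITION & SPEC =====
def Spec_strip_cover_from_markdown_py (md_content : String) (out : String) : Prop := out = strip_cover_from_markdown_py_alt md_content
instance (md_content : String) (out : String) : Decidable (Spec_strip_cover_from_markdown_py md_content out) := by unfold Spec_strip_cover_from_markdown_py; infer_instance

-- ===== CLAIM (what is proved, stated in full; the proofs are below) =====
def Claim_equal_strip_cover_from_markdown_py : Prop := ∀ (md_content : String), Dom_strip_cover_from_markdown_py md_content → Spec_strip_cover_from_markdown_py md_content (strip_cover_from_markdown_py md_content)

-- ===== LEMMAS AND PROOFS =====

-- phase 3: heading found, not skipping — every remaining line is kept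
lemma pvPhase3 (ls : List String) (acc : List String) :
    ls.foldl pvStepA (acc, false, true) = (acc ++ ls, false, true) := by
  induction ls generalizing acc with
  | nil => simp
  | cons l rest ih =>
    simp only [List.foldl_cons, pvStepA]
    simp only [Bool.not_true, Bool.false_and, if_neg (by simp : ¬ false = true)]
    rw [ih]
    simp

-- phase 2: skipping until separator
lemma pvPhase2 (ls : List String) (acc : List String) :
    ls.foldl pvStepA (acc, true, true) =
      match pvFindSep ls with
      | none => (acc, true, true)
      | some j => (acc ++ ls.drop (j + 1), false, true) := by
  induction ls generalizing acc with
  | nil => simp [pvFindSep]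
  | cons l rest ih =>
    simp only [List.foldl_cons, pvStepA, pvFindSep]
    by_cases hsep : PySem.Str.strip l == "---"
    · simp only [hsep, Bool.not_true, Bool.false_and, if_true,
        if_neg (by simp : ¬ false = true)]
      rw [pvPhase3]
      simp
    · simp only [hsep, Bool.not_true, Bool.false_and, if_true,
        if_neg (by simp : ¬ false = true)]
      rw [ih]
      cases h : pvFindSep rest <;> simp [List.drop]

-- phase 1: before the first heading — lines are kept; at the heading switch to phase 2
lemma pvPhase1 (ls : List String) (acc : List String) :
    (ls.foldl pvStepA (acc, false, false)).1 =
      match pvFindHead ls with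
      | none => acc ++ ls
      | some i =>
        match pvFindSep (ls.drop (i + 1)) with
        | none => acc ++ ls.take i
        | some j => acc ++ ls.take i ++ (ls.drop (i + 1)).drop (j + 1) := by
  induction ls generalizing acc with
  | nil => simp [pvFindHead]
  | cons l rest ih =>
    simp only [List.foldl_cons, pvStepA, pvFindHead]
    by_cases hh : PySem.Str.startswith (PySem.Str.strip l) "# "
    · simp only [hh, Bool.not_false, Bool.true_and, if_true]
      rw [pvPhase2]
      cases h : pvFindSep rest <;> simp [h, List.drop, List.take]
    · simp only [hh, Bool.not_false, Bool.true_and,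
        if_neg (by simp : ¬ false = true)]
      rw [ih]
      cases h : pvFindHead rest
      · simp
      · rename_i i
        cases h2 : pvFindSep (rest.drop (i + 1)) <;> simp [h2, List.drop, List.take]

-- ===== VERDICT (by name: the statement is the Claim_ definition above) =====
theorem strip_cover_from_markdown_py_spec : Claim_equal_strip_cover_from_markdown_py := by
  intro md _
  show _ = _
  unfold strip_cover_from_markdown_py strip_cover_from_markdown_py_alt
  simp only [pvPhase1]
  cases h : pvFindHead (pvLines md)
  · simp
  · rename_i i
    cases h2 : pvFindSep ((pvLines md).drop (i + 1)) <;> simp [h2]
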